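-- pv_equiv track=rewrite | github.com/kuritaeiji/midori | dp/hatuden.py | dfs
-- ===== SOURCE A (Python) =====
-- def dfs(t, benefits, dp):
--     if t <= 0:
--         return 0
--
--     if dp[t] != -1:
--         return dp[t]
--
--     # i秒からj秒まで発電をオンにしていた場合の最大利得
--     # t=４の場合以下のパターンのときに発電所を動かした場合の最大利得を求める
--     # 0-1,0-2,0-3,0-4
--     # 1-2,1-3,1-4
--     # 2-3,2-4
--     # 3-4
--     # 例えば3-4で発電所を動かす場合、2秒まで発電所を動かした場合の最大利得+発電所を3秒-4秒動かした場合の利得を求めれば良い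
--     max_benefit = 0
--     for i in range(t + 1):
--         for j in range(i + 1, t + 1):
--             max_benefit = max(
--                 dfs(i - 1, benefits, dp) + benefits[i][j - 1], max_benefit
--             )
--
--     dp[t] = max_benefit
--
--     return max_benefit
-- ===== SOURCE B (Python) =====
-- def dfs(t, benefits, dp):
--     if t <= 0:
--         return 0
--     if dp[t] != -1:
--         return dp[t]
--     # bottom-up: g[s] = value of the subproblem for second s (memo-aware),
--     # r = best benefit over all intervals contained in [0, s] so far
--     g = [0]
--     r = 0
--     for s in range(1, t + 1):
--         for i in range(s):
--             prev = g[i - 1] if i >= 1 else 0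
--             cand = prev + benefits[i][s - 1]
--             if cand > r:
--                 r = cand
--         if dp[s] != -1:
--             g.append(dp[s])
--         else:
--             g.append(r)
--             dp[s] = r
--     return r
-- ===== Notes on version B (the rewrite author's own statement) =====
-- stated objective: alternative
-- what changed: replaces A's memoized recursion, whose t-level loop re-enumerates all interval pairs (i,j) at every level, with a single bottom-up pass that keeps a running best r and folds in only the column of intervals ending at the current second, reusing seeded dp entries the same way
import Mathlib
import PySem

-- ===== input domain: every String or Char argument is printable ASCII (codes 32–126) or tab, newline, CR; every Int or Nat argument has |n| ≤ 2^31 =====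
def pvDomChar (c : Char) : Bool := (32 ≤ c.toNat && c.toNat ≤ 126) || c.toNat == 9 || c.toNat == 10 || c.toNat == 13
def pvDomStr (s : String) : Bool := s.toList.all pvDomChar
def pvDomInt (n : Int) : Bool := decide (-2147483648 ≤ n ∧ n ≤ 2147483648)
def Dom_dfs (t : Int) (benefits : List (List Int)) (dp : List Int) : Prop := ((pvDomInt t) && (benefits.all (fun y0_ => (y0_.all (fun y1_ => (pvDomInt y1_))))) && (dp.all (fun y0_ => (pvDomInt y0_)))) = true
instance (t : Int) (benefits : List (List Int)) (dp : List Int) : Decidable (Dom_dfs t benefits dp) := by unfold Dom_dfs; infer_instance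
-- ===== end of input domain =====

-- B replaces A's memoized recursion (every level re-enumerates all interval pairs) with a single
-- bottom-up pass that adds only the intervals ending at the current second; both Pythons mutate the
-- memo list dp, with slightly different fill patterns (A never fills dp[t-1]), so the equivalence
-- proved here is about the RETURN value only.

-- shared indexing helpers (Python dp[i] and benefits[i][j]; the getD defaults are never hit inside Pre_)
def dget (dp : List Int) (i : Int) : Int := (PySem.List.pyGet? dp i).getD (-1)
def bget (b : List (List Int)) (i j : Int) : Int := (PySem.List.pyGet? ((PySem.List.pyGet? b i).getD []) j).getD 0

-- ===== PORT A =====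
def dfs (t : Int) (benefits : List (List Int)) (dp : List Int) : Int :=
  if _ht : t ≤ 0 then 0
  else if dget dp t ≠ -1 then dget dp t
  else
    (PySem.List.pyRange 0 (t+1) 1).attach.foldl
      (fun mb i =>
        (PySem.List.pyRange (i.1+1) (t+1) 1).foldl
          (fun mb2 j => max (dfs (i.1-1) benefits dp + bget benefits i.1 (j-1)) mb2)
          mb)
      0
termination_by t.toNat
decreasing_by
  have h := PySem.List.mem_pyRange_one.mp i.2
  omega

-- ===== PORT B =====
-- loop body of Source B's 'for s in range(1, t+1)'; state = (g, r)
def stepB (benefits : List (List Int)) (dp : List Int) (st : List Int × Int) (s : Int) : List Int × Int :=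
  let r := (PySem.List.pyRange 0 s 1).foldl
    (fun r i =>
      let prev := if 1 ≤ i then (PySem.List.pyGet? st.1 (i-1)).getD 0 else 0
      let cand := prev + bget benefits i (s-1)
      if cand > r then cand else r)
    st.2
  if dget dp s ≠ -1 then (st.1 ++ [dget dp s], r) else (st.1 ++ [r], r)

def dfs_alt (t : Int) (benefits : List (List Int)) (dp : List Int) : Int :=
  if t ≤ 0 then 0
  else if dget dp t ≠ -1 then dget dp t
  else ((PySem.List.pyRange 1 (t+1) 1).foldl (stepB benefits dp) (([0] : List Int), (0 : Int))).2

-- ===== PRECONDITION & SPEC =====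
-- Pre_ excludes exactly the inputs where Python A raises IndexError: t ≥ 1 with dp shorter than t+1,
-- or dp[t] == -1 with benefits missing one of the rows 0..t-1 or a row shorter than t.
def Pre_dfs (t : Int) (benefits : List (List Int)) (dp : List Int) : Prop :=
  t ≤ 0 ∨ (t < (dp.length : Int) ∧
    (dget dp t ≠ -1 ∨
      (t ≤ (benefits.length : Int) ∧ ∀ row ∈ benefits.take t.toNat, t ≤ (row.length : Int))))
instance (t : Int) (benefits : List (List Int)) (dp : List Int) : Decidable (Pre_dfs t benefits dp) := by
  unfold Pre_dfs; infer_instance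

def pvWitness_dfs : Int × List (List Int) × List Int := (2, [[1, 2], [3, 4]], [-1, -1, -1])

def Spec_dfs (t : Int) (benefits : List (List Int)) (dp : List Int) (out : Int) : Prop := out = dfs_alt t benefits dp
instance (t : Int) (benefits : List (List Int)) (dp : List Int) (out : Int) : Decidable (Spec_dfs t benefits dp out) := by unfold Spec_dfs; infer_instance

-- ===== CLAIM (what is proved, stated in full; the proofs are below) =====
def Claim_equal_dfs : Prop := ∀ (t : Int) (benefits : List (List Int)) (dp : List Int), Dom_dfs t benefits dp → Pre_dfs t benefits dp → Spec_dfs t benefits dp (dfs t benefits dp)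

-- ===== LEMMAS AND PROOFS =====

-- A's double loop at level t, attach removed
def Aloop (t : Int) (b : List (List Int)) (dp : List Int) : Int :=
  (PySem.List.pyRange 0 (t+1) 1).foldl
    (fun mb i =>
      (PySem.List.pyRange (i+1) (t+1) 1).foldl
        (fun mb2 j => max (dfs (i-1) b dp + bget b i (j-1)) mb2)
        mb)
    0

theorem dfs_of_nonpos (t : Int) (b : List (List Int)) (dp : List Int) (ht : t ≤ 0) :
    dfs t b dp = 0 := by
  rw [dfs]; simp [ht]

theorem dfs_of_memo (t : Int) (b : List (List Int)) (dp : List Int) (ht : ¬ t ≤ 0)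
    (hm : dget dp t ≠ -1) : dfs t b dp = dget dp t := by
  rw [dfs]; simp [ht, hm]

theorem dfs_of_loop (t : Int) (b : List (List Int)) (dp : List Int) (ht : ¬ t ≤ 0)
    (hm : dget dp t = -1) : dfs t b dp = Aloop t b dp := by
  rw [dfs]
  simp only [ht, hm, ne_eq, not_true_eq_false, if_false, dite_eq_ite]
  rw [Aloop, ← List.attach_map_subtype_val (l := PySem.List.pyRange 0 (t+1) 1), List.foldl_map]
  simp

-- seeds commute through a fold whose step commutes with max
theorem foldl_seed_comm {α : Type} (L : List α) (f : Int → α → Int)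
    (hf : ∀ i ∈ L, ∀ p q : Int, f (max p q) i = max p (f q i)) (p q : Int) :
    L.foldl f (max p q) = max p (L.foldl f q) := by
  induction L generalizing q with
  | nil => simp
  | cons x L ih =>
    simp only [List.foldl_cons]
    rw [hf x (by simp), ih (fun i hi => hf i (by simp [hi]))]

-- interchange: folding "max (u i) (F · i)" equals the max-of-u fold seeded with the F fold
theorem foldl_interchange {α : Type} (L : List α) (u : α → Int) (F : Int → α → Int)
    (hF : ∀ i ∈ L, ∀ p q : Int, F (max p q) i = max p (F q i)) (a : Int) :
    L.foldl (fun mb i => max (u i) (F mb i)) a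
      = L.foldl (fun r i => max r (u i)) (L.foldl F a) := by
  induction L generalizing a with
  | nil => simp
  | cons x L ih =>
    simp only [List.foldl_cons]
    have hG : ∀ i ∈ L, ∀ p q : Int,
        max (u i) (F (max p q) i) = max p (max (u i) (F q i)) := by
      intro i hi p q
      rw [hF i (by simp [hi]), max_left_comm]
    rw [foldl_seed_comm L _ hG, ih (fun i hi => hF i (by simp [hi]))]
    rw [max_comm (List.foldl F (F a x) L) (u x),
        foldl_seed_comm L _ (by
          intro i _ p q
          rw [max_assoc])]

-- the column recurrence: Aloop (s+1) adds to Aloop s the intervals ending at second s+1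
theorem Aloop_succ (s : Int) (hs : 0 ≤ s) (b : List (List Int)) (dp : List Int) :
    Aloop (s+1) b dp
      = (PySem.List.pyRange 0 (s+1) 1).foldl
          (fun r i => max r (dfs (i-1) b dp + bget b i s)) (Aloop s b dp) := by
  unfold Aloop
  rw [PySem.List.pyRange_one_succ_right (a := 0) (b := s+1) (by omega), List.foldl_append]
  have hnil : PySem.List.pyRange (s+1+1) (s+1+1) 1 = [] := PySem.List.pyRange_one_eq_nil (by omega)
  simp only [List.foldl_cons, List.foldl_nil, hnil]
  have hsplit :
      (PySem.List.pyRange 0 (s+1) 1).foldl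
        (fun mb i =>
          (PySem.List.pyRange (i+1) (s+1+1) 1).foldl
            (fun mb2 j => max (dfs (i-1) b dp + bget b i (j-1)) mb2) mb) 0
      = (PySem.List.pyRange 0 (s+1) 1).foldl
        (fun mb i => max (dfs (i-1) b dp + bget b i s)
          ((PySem.List.pyRange (i+1) (s+1) 1).foldl
            (fun mb2 j => max (dfs (i-1) b dp + bget b i (j-1)) mb2) mb)) 0 := by
    apply PySem.List.foldl_congr_mem
    intro mb i hi
    have hb := PySem.List.mem_pyRange_one.mp hi
    rw [PySem.List.pyRange_one_succ_right (a := i+1) (b := s+1) (by omega), List.foldl_append]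
    simp only [List.foldl_cons, List.foldl_nil]
    have : s + 1 - 1 = s := by omega
    rw [this, max_comm]
  rw [hsplit]
  exact foldl_interchange (PySem.List.pyRange 0 (s+1) 1)
    (fun i => dfs (i-1) b dp + bget b i s)
    (fun mb i =>
      (PySem.List.pyRange (i+1) (s+1) 1).foldl
        (fun mb2 j => max (dfs (i-1) b dp + bget b i (j-1)) mb2) mb)
    (fun i _ p q => foldl_seed_comm _ _ (fun j _ p' q' => by rw [max_left_comm]) p q) 0

-- the values B's g list must hold: g[s] = dfs s
def gvals (b : List (List Int)) (dp : List Int) (k : Nat) : List Int :=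
  (List.range (k+1)).map (fun (s : Nat) => dfs ((s : Int)) b dp)

theorem gvals_get (b : List (List Int)) (dp : List Int) (k : Nat) (i : Int)
    (h1 : 1 ≤ i) (h2 : i ≤ (k : Int)) :
    (PySem.List.pyGet? (gvals b dp k) (i-1)).getD 0 = dfs (i-1) b dp := by
  rw [PySem.List.pyGet?_of_nonneg (gvals b dp k) (by omega : (0:Int) ≤ i - 1)]
  unfold gvals
  rw [List.getElem?_map, List.getElem?_range (by omega : (i-1).toNat < k+1)]
  simp only [Option.map_some, Option.getD_some]
  congr 1
  omega

theorem ite_gt_eq_max (r c : Int) : (if c > r then c else r) = max r c := by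
  split_ifs with h
  · exact (max_eq_right h.le).symm
  · exact (max_eq_left (by omega)).symm

theorem Aloop_zero (b : List (List Int)) (dp : List Int) : Aloop 0 b dp = 0 := by
  have h1 : PySem.List.pyRange 0 1 1 = [0] := PySem.List.pyRange_one_singleton 0
  have h2 : PySem.List.pyRange 1 1 1 = [] := PySem.List.pyRange_one_eq_nil (by omega)
  unfold Aloop
  norm_num
  rw [h1]
  simp [h2]

-- main invariant of B's bottom-up loop
theorem Bfold_inv (b : List (List Int)) (dp : List Int) (k : Nat) :
    (PySem.List.pyRange 1 ((k : Int)+1) 1).foldl (stepB b dp) (([0] : List Int), (0 : Int))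
      = (gvals b dp k, Aloop (k : Int) b dp) := by
  induction k with
  | zero =>
    rw [PySem.List.pyRange_one_eq_nil (by omega)]
    simp only [List.foldl_nil]
    have : gvals b dp 0 = [0] := by
      unfold gvals
      simp [dfs_of_nonpos 0 b dp (by omega)]
    rw [this]
    have : Aloop ((0 : Nat) : Int) b dp = 0 := by norm_num [Aloop_zero]
    rw [this]
  | succ k ih =>
    have hcast : ((k+1 : Nat) : Int) + 1 = ((k : Int) + 1) + 1 := by push_cast; ring
    rw [hcast, PySem.List.pyRange_one_succ_right (a := 1) (b := (k : Int)+1) (by omega),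
        List.foldl_append, ih]
    simp only [List.foldl_cons, List.foldl_nil]
    -- compute the step at s = k+1
    unfold stepB
    have hr :
        (PySem.List.pyRange 0 ((k : Int)+1) 1).foldl
          (fun r i =>
            let prev := if 1 ≤ i then (PySem.List.pyGet? (gvals b dp k, Aloop (k : Int) b dp).1 (i-1)).getD 0 else 0
            let cand := prev + bget b i ((k : Int)+1-1)
            if cand > r then cand else r)
          (gvals b dp k, Aloop (k : Int) b dp).2
        = Aloop ((k : Int)+1) b dp := by
      dsimp only
      rw [Aloop_succ (k : Int) (by omega) b dp]
      apply PySem.List.foldl_congr_mem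
      intro r i hi
      have hb := PySem.List.mem_pyRange_one.mp hi
      have hk : (k : Int) + 1 - 1 = (k : Int) := by omega
      simp only [hk]
      by_cases h1 : 1 ≤ i
      · rw [if_pos h1, gvals_get b dp k i h1 (by omega)]
        exact ite_gt_eq_max _ _
      · have hi0 : i = 0 := by omega
        subst hi0
        rw [if_neg h1, dfs_of_nonpos (0-1) b dp (by omega)]
        exact ite_gt_eq_max _ _
    rw [hr]
    have hg : gvals b dp (k+1) = gvals b dp k ++ [dfs ((k : Int)+1) b dp] := by
      unfold gvals
      rw [List.range_succ, List.map_append]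
      simp only [List.map_cons, List.map_nil]
      norm_num
    rw [hg]
    by_cases hm : dget dp ((k : Int)+1) ≠ -1
    · rw [if_pos hm, dfs_of_memo ((k : Int)+1) b dp (by omega) hm]
      push_cast
      rfl
    · rw [if_neg hm, dfs_of_loop ((k : Int)+1) b dp (by omega) (by omega)]
      push_cast
      rfl

-- the two ports agree on every input (the Pre_ hypothesis is needed only for Python, where A raises)
theorem dfs_eq_alt (t : Int) (b : List (List Int)) (dp : List Int) :
    dfs t b dp = dfs_alt t b dp := by
  by_cases ht : t ≤ 0
  · rw [dfs_of_nonpos t b dp ht, dfs_alt, if_pos ht]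
  · by_cases hm : dget dp t ≠ -1
    · rw [dfs_of_memo t b dp ht hm, dfs_alt, if_neg ht, if_pos hm]
    · rw [dfs_of_loop t b dp ht (by omega), dfs_alt, if_neg ht, if_neg hm]
      have hk : ((t.toNat : Int)) = t := Int.toNat_of_nonneg (by omega)
      rw [show t + 1 = (t.toNat : Int) + 1 by omega, Bfold_inv b dp t.toNat, hk]

-- ===== VERDICT (by name: the statement is the Claim_ definition above) =====
theorem dfs_spec : Claim_equal_dfs := by
  intro t benefits dp _ _
  unfold Spec_dfs
  exact dfs_eq_alt t benefits dp
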